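-- pv_equiv track=rewrite | github.com/0pert/Python-TypingTest | functions.py | word_result
-- ===== SOURCE A (Python) =====
-- def word_result(computer, user):
--     """
--     Compare original line with user input
--     Returns nr of failed words
--     """
--     fail = 0
--     for index1, row in enumerate(computer):
--
--         for index2, word in enumerate(row):
--
--             if index2 <= len(user[index1]) - 1:
--                 if word != user[index1][index2]:
--                     fail += 1
--             else:
--                 fail += 1
--
--     return fail
-- ===== SOURCE B (Python) =====
-- def word_result(computer, user):
--     """
--     Compare original line with user input
--     Returns nr of failed words
--     """
--     total = sum(len(row) for row in computer)
--     correct = sum(a == b for crow, urow in zip(computer, user)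
--                           for a, b in zip(crow, urow))
--     return total - correct
-- ===== Notes on version B (the rewrite author's own statement) =====
-- stated objective: simpler
-- what changed: B computes fails by subtraction: the total word count of computer minus the number of positionally matching words in the zipped overlap, replacing A's per-word index-bound check and conditional fail accumulation.
import Mathlib
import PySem

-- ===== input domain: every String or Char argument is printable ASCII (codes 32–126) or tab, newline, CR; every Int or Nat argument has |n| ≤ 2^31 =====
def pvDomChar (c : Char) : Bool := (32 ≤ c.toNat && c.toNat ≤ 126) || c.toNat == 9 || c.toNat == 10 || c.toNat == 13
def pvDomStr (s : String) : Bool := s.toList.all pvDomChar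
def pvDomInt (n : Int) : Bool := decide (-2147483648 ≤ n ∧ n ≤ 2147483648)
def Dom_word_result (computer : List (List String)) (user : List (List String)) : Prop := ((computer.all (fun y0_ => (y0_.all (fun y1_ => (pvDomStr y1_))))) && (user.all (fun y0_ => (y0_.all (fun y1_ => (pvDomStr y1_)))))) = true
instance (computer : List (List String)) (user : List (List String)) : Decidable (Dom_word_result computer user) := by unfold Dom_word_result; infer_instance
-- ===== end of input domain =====

-- B counts by subtraction (total words minus positional matches) instead of A's
-- per-word index-bound check with conditional fail accumulation: simpler decomposition.

-- ===== PORT A =====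
-- inner loop: 'for index2, word in enumerate(row): …' (index2 carried explicitly)
def wrInner (u : List String) : List String → Int → Int → Int
  | [], _, fail => fail
  | w :: rest, j, fail =>
      wrInner u rest (j + 1)
        (if j ≤ (u.length : Int) - 1 then
           (if w ≠ ((PySem.List.pyGet? u j).getD "") then fail + 1 else fail)
         else fail + 1)

-- outer loop: 'for index1, row in enumerate(computer): …'
def wrOuter (user : List (List String)) : List (List String) → Int → Int → Int
  | [], _, fail => fail
  | row :: rest, i, fail =>
      wrOuter user rest (i + 1) (wrInner ((PySem.List.pyGet? user i).getD []) row 0 fail)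

def word_result (computer : List (List String)) (user : List (List String)) : Int :=
  wrOuter user computer 0 0

-- ===== PORT B =====
-- 'sum(len(row) for row in computer)'
def wbTotal : List (List String) → Int
  | [] => 0
  | row :: rest => (row.length : Int) + wbTotal rest

-- inner generator 'for a, b in zip(crow, urow)': number of positional matches
def wbRowCorrect : List (String × String) → Int
  | [] => 0
  | (a, b) :: rest => (if a == b then 1 else 0) + wbRowCorrect rest

-- outer generator 'for crow, urow in zip(computer, user)'
def wbCorrect : List (List String × List String) → Int
  | [] => 0
  | (crow, urow) :: rest => wbRowCorrect (crow.zip urow) + wbCorrect rest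

def word_result_alt (computer : List (List String)) (user : List (List String)) : Int :=
  wbTotal computer - wbCorrect (computer.zip user)

-- ===== PRECONDITION & SPEC =====
-- Pre_ excludes exactly the inputs on which Python A raises IndexError: some computer row
-- at an index ≥ len(user) is non-empty (A evaluates len(user[index1]) only when the row
-- has a word). On every input where A returns, Pre_ holds.
def Pre_word_result (computer : List (List String)) (user : List (List String)) : Prop :=
  ((computer.drop user.length).all (fun r => r.isEmpty)) = true
instance (computer : List (List String)) (user : List (List String)) : Decidable (Pre_word_result computer user) := by unfold Pre_word_result; infer_instance

def pvWitness_word_result : List (List String) × List (List String) :=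
  ([["the", "cat"], ["sat"]], [["the", "cta"], ["sat", "x"]])

def Spec_word_result (computer : List (List String)) (user : List (List String)) (out : Int) : Prop := out = word_result_alt computer user
instance (computer : List (List String)) (user : List (List String)) (out : Int) : Decidable (Spec_word_result computer user out) := by unfold Spec_word_result; infer_instance

-- ===== CLAIM (what is proved, stated in full; the proofs are below) =====
def Claim_equal_word_result : Prop := ∀ (computer : List (List String)) (user : List (List String)), Dom_word_result computer user → Pre_word_result computer user → Spec_word_result computer user (word_result computer user)

-- ===== LEMMAS AND PROOFS =====

-- A's inner loop at index j counts the row's length minus the positional matches with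
-- the remaining user words.
theorem wrInner_eq (u : List String) (row : List String) :
    ∀ (j : Nat) (fail : Int),
      wrInner u row (j : Int) fail
        = fail + (row.length : Int) - wbRowCorrect (row.zip (u.drop j)) := by
  induction row with
  | nil =>
    intro j fail
    simp [wrInner, wbRowCorrect]
  | cons w rest ih =>
    intro j fail
    by_cases hj : j < u.length
    · have hget : PySem.List.pyGet? u (j : Int) = some u[j] :=
        PySem.List.pyGet?_ofNat u j hj
      have hdrop : u.drop j = u[j] :: u.drop (j + 1) :=
        (List.getElem_cons_drop hj).symm
      have hcond : (j : Int) ≤ (u.length : Int) - 1 := by omega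
      simp only [wrInner, if_pos hcond, hget, Option.getD_some, hdrop, List.zip_cons_cons,
        wbRowCorrect, List.length_cons]
      have hcast : ((j : Int) + 1) = ((j + 1 : Nat) : Int) := by push_cast; ring
      rw [hcast, ih (j + 1)]
      by_cases he : w = u[j]
      · simp only [he, ne_eq, not_true_eq_false, if_false, beq_self_eq_true, if_true]
        push_cast; ring
      · have : (w == u[j]) = false := beq_eq_false_iff_ne.mpr he
        simp only [ne_eq, he, not_false_eq_true, if_true, this]
        push_cast; ring
    · have hdrop : u.drop j = [] := List.drop_eq_nil_of_le (by omega)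
      have hdrop' : u.drop (j + 1) = [] := List.drop_eq_nil_of_le (by omega)
      have hcond : ¬ ((j : Int) ≤ (u.length : Int) - 1) := by omega
      simp only [wrInner, if_neg hcond]
      have hcast : ((j : Int) + 1) = ((j + 1 : Nat) : Int) := by push_cast; ring
      rw [hcast, ih (j + 1)]
      simp only [hdrop, hdrop', List.zip_nil_right, wbRowCorrect, List.length_cons]
      push_cast; ring

-- A's outer loop from index i equals B's subtraction over the remaining user rows.
theorem wrOuter_eq (user : List (List String)) (comp : List (List String)) :
    ∀ (i : Nat) (acc : Int),
      wrOuter user comp (i : Int) acc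
        = acc + wbTotal comp - wbCorrect (comp.zip (user.drop i)) := by
  induction comp with
  | nil => intro i acc; simp [wrOuter, wbTotal, wbCorrect]
  | cons row rest ih =>
    intro i acc
    simp only [wrOuter]
    have hcast : ((i : Int) + 1) = ((i + 1 : Nat) : Int) := by push_cast; ring
    rw [hcast, ih (i + 1)]
    by_cases hi : i < user.length
    · have hget : PySem.List.pyGet? user (i : Int) = some user[i] :=
        PySem.List.pyGet?_ofNat user i hi
      have hdrop : user.drop i = user[i] :: user.drop (i + 1) :=
        (List.getElem_cons_drop hi).symm
      rw [hget]
      simp only [Option.getD_some, hdrop, List.zip_cons_cons, wbCorrect, wbTotal]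
      have h := wrInner_eq user[i] row 0 acc
      simp only [Nat.cast_zero, List.drop_zero] at h
      rw [h]; ring
    · have hget : PySem.List.pyGet? user (i : Int) = none := by
        simp [PySem.List.pyGet?, PySem.List.pyIdx?]
        omega
      have hdrop : user.drop i = [] := List.drop_eq_nil_of_le (by omega)
      have hdrop' : user.drop (i + 1) = [] := List.drop_eq_nil_of_le (by omega)
      rw [hget]
      simp only [Option.getD_none, hdrop, hdrop', List.zip_nil_right, wbCorrect, wbTotal]
      have h := wrInner_eq [] row 0 acc
      simp only [Nat.cast_zero, List.drop_zero, List.zip_nil_right, wbRowCorrect] at h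
      rw [h]; ring

-- ===== VERDICT (by name: the statement is the Claim_ definition above) =====
theorem word_result_spec : Claim_equal_word_result := by
  intro computer user _ _
  unfold Spec_word_result word_result word_result_alt
  have := wrOuter_eq user computer 0 0
  simpa using this
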